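-- pv_equiv track=rewrite | github.com/prefeiturasp/SME-Terceirizadas | sme_terceirizadas/pre_recebimento/tasks.py | _paginar_dados_relatorio_pdf
-- ===== SOURCE A (Python) =====
-- def _paginar_dados_relatorio_pdf(dados):
--     """
--     Pagina os cronogramas em uma lista de listas, respeitando as seguintes regras:
--
--     - Cada página pode conter:
--         - Até 3 cronogramas.
--         - No máximo 6 etapas, no total.
--         - Exceções:
--             - Se houver apenas 2 cronogramas, a página pode conter até 9 etapas.
--             - Se houver apenas 1 cronograma, a página não levará em consideração o número de etapas.
--
--     Parâmetros:
--     dados (list): Lista de dicionários, onde cada dicionário representa um cronograma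
--                   e possui uma chave 'etapas' que é uma lista de etapas.
--
--     Retorna:
--     dados_paginados: Uma lista de listas, onde cada lista interna contém cronogramas paginados
--                      de acordo com as regras definidas.
--     """
--
--     dados_paginados = []
--     pagina_atual = []
--     for cronograma in dados:
--         qtd_cronogramas = len(pagina_atual)
--         qtd_etapas_atual = sum([len(c["etapas"]) for c in pagina_atual])
--         qtd_etapas_adicionais = len(cronograma["etapas"])
--
--         if (
--             qtd_cronogramas > 2 or qtd_etapas_atual + qtd_etapas_adicionais > 6
--         ) and not (
--             (qtd_cronogramas == 1 and qtd_etapas_atual + qtd_etapas_adicionais < 10)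
--             or (qtd_cronogramas == 0)
--         ):
--             dados_paginados.append([*pagina_atual])
--             pagina_atual.clear()
--
--         pagina_atual.append(cronograma)
--
--     if pagina_atual:
--         dados_paginados.append(pagina_atual)
--
--     return dados_paginados
-- ===== SOURCE B (Python) =====
-- def _paginar_dados_relatorio_pdf(dados):
--     # Closed-form pagination: instead of simulating A's flush rule with an
--     # accumulating page, the size of each page is computed directly from the
--     # etapa counts of (at most) the next three cronogramas, then sliced off.
--     paginas = []
--     i = 0
--     while i < len(dados):
--         lens = [len(c["etapas"]) for c in dados[i:i + 3]]
--         if len(lens) >= 2 and lens[0] + lens[1] < 10: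
--             k = 3 if len(lens) == 3 and sum(lens) <= 6 else 2
--         else:
--             k = 1
--         paginas.append(dados[i:i + k])
--         i += k
--     return paginas
-- ===== Notes on version B (the rewrite author's own statement) =====
-- stated objective: alternative
-- what changed: B replaces A's stateful flush-rule simulation (accumulating page, rescanned with len and an inner sum each step) by a closed-form computation: each page's size (1, 2 or 3) is derived directly from the etapa counts of the next up-to-three cronogramas via the derived thresholds n1+n2<10 and n1+n2+n3<=6, then that many items are sliced off.
import Mathlib
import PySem

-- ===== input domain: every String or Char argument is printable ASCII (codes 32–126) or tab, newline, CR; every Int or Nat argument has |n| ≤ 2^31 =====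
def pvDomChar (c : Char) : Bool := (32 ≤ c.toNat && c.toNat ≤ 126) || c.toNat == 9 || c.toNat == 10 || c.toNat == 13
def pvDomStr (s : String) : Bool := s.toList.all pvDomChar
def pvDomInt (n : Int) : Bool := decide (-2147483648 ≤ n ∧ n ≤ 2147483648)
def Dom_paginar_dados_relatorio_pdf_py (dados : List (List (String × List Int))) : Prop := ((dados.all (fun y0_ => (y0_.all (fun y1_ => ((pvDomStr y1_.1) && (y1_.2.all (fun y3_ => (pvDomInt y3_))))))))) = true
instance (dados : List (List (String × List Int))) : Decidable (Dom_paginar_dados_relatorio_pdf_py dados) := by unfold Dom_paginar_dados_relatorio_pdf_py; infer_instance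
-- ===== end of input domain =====

-- B replaces A's stateful flush-rule simulation by a closed-form page-size computation
-- (each page's size 1/2/3 read off the next up-to-three etapa counts) plus slicing.

-- ===== PORT A =====
-- len(c["etapas"]); on Pre_ the key is present, so getD [] never fires.
def pvEtapasLen (c : List (String × List Int)) : Nat :=
  (((PySem.Dict.mk c).get? "etapas").getD []).length

def paginar_dados_relatorio_pdf_py (dados : List (List (String × List Int))) : List (List (List (String × List Int))) :=
  -- state: (dados_paginados, pagina_atual)
  let st := dados.foldl (fun (st : List (List (List (String × List Int))) × List (List (String × List Int))) cronograma =>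
    let pagina := st.2
    let qtd_cronogramas := pagina.length
    let qtd_etapas_atual := (pagina.map pvEtapasLen).sum
    let qtd_etapas_adicionais := pvEtapasLen cronograma
    if (qtd_cronogramas > 2 ∨ qtd_etapas_atual + qtd_etapas_adicionais > 6) ∧
       ¬ ((qtd_cronogramas = 1 ∧ qtd_etapas_atual + qtd_etapas_adicionais < 10) ∨ qtd_cronogramas = 0)
    then (st.1 ++ [pagina], [cronograma])
    else (st.1, pagina ++ [cronograma])) ([], [])
  if st.2 = [] then st.1 else st.1 ++ [st.2]

-- ===== PORT B =====
-- the while loop of Source B, as recursion on the remaining suffix of dados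
-- (fuel = initial length, a pure totality device: it never runs out)
def pvAltGo : Nat → List (List (String × List Int)) → List (List (List (String × List Int)))
  | 0, _ => []
  | _ + 1, [] => []
  | fuel + 1, rest@(_ :: _) =>
    let lens := (rest.take 3).map pvEtapasLen
    let k := if 2 ≤ lens.length ∧ lens.getD 0 0 + lens.getD 1 0 < 10 then
               (if lens.length = 3 ∧ lens.sum ≤ 6 then 3 else 2)
             else 1
    rest.take k :: pvAltGo fuel (rest.drop k)

def paginar_dados_relatorio_pdf_py_alt (dados : List (List (String × List Int))) : List (List (List (String × List Int))) :=
  pvAltGo dados.length dados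

-- ===== PRECONDITION & SPEC =====
-- Pre_ excludes exactly the inputs where some cronograma lacks the key "etapas":
-- there Python A (and B) raise KeyError.
def Pre_paginar_dados_relatorio_pdf_py (dados : List (List (String × List Int))) : Prop :=
  ∀ c ∈ dados, ((PySem.Dict.mk c).get? "etapas").isSome

instance (dados : List (List (String × List Int))) : Decidable (Pre_paginar_dados_relatorio_pdf_py dados) := by unfold Pre_paginar_dados_relatorio_pdf_py; infer_instance

def pvWitness_paginar_dados_relatorio_pdf_py : (List (List (String × List Int))) :=
  [[("etapas", [1, 2])], [("etapas", [3])]]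

def Spec_paginar_dados_relatorio_pdf_py (dados : List (List (String × List Int))) (out : List (List (List (String × List Int)))) : Prop := out = paginar_dados_relatorio_pdf_py_alt dados
instance (dados : List (List (String × List Int))) (out : List (List (List (String × List Int)))) : Decidable (Spec_paginar_dados_relatorio_pdf_py dados out) := by unfold Spec_paginar_dados_relatorio_pdf_py; infer_instance

-- ===== CLAIM (what is proved, stated in full; the proofs are below) =====
def Claim_equal_paginar_dados_relatorio_pdf_py : Prop := ∀ (dados : List (List (String × List Int))), Dom_paginar_dados_relatorio_pdf_py dados → Pre_paginar_dados_relatorio_pdf_py dados → Spec_paginar_dados_relatorio_pdf_py dados (paginar_dados_relatorio_pdf_py dados)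

-- ===== LEMMAS AND PROOFS =====

-- A's fold step and finalization, named for the lemmas (definitionally A's body)
def pvStepA (st : List (List (List (String × List Int))) × List (List (String × List Int)))
    (cronograma : List (String × List Int)) :
    List (List (List (String × List Int))) × List (List (String × List Int)) :=
  let pagina := st.2
  let qtd_cronogramas := pagina.length
  let qtd_etapas_atual := (pagina.map pvEtapasLen).sum
  let qtd_etapas_adicionais := pvEtapasLen cronograma
  if (qtd_cronogramas > 2 ∨ qtd_etapas_atual + qtd_etapas_adicionais > 6) ∧
     ¬ ((qtd_cronogramas = 1 ∧ qtd_etapas_atual + qtd_etapas_adicionais < 10) ∨ qtd_cronogramas = 0)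
  then (st.1 ++ [pagina], [cronograma])
  else (st.1, pagina ++ [cronograma])

def pvFinA (st : List (List (List (String × List Int))) × List (List (String × List Int))) :
    List (List (List (String × List Int))) :=
  if st.2 = [] then st.1 else st.1 ++ [st.2]

theorem pvStepA_pos (st : List (List (List (String × List Int))) × List (List (String × List Int)))
    (c : List (String × List Int))
    (h : (st.2.length > 2 ∨ (st.2.map pvEtapasLen).sum + pvEtapasLen c > 6) ∧
         ¬ ((st.2.length = 1 ∧ (st.2.map pvEtapasLen).sum + pvEtapasLen c < 10) ∨ st.2.length = 0)) :
    pvStepA st c = (st.1 ++ [st.2], [c]) := by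
  simp only [pvStepA]; rw [if_pos h]

theorem pvStepA_neg (st : List (List (List (String × List Int))) × List (List (String × List Int)))
    (c : List (String × List Int))
    (h : ¬ ((st.2.length > 2 ∨ (st.2.map pvEtapasLen).sum + pvEtapasLen c > 6) ∧
         ¬ ((st.2.length = 1 ∧ (st.2.map pvEtapasLen).sum + pvEtapasLen c < 10) ∨ st.2.length = 0))) :
    pvStepA st c = (st.1, st.2 ++ [c]) := by
  simp only [pvStepA]; rw [if_neg h]

-- unfolding lemmas for pvAltGo at each page shape
theorem altGo_nil (f : Nat) : pvAltGo f [] = [] := by cases f <;> simp [pvAltGo]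

theorem altGo_single (f : Nat) (c1 : List (String × List Int)) :
    pvAltGo (f + 1) [c1] = [[c1]] := by
  simp [pvAltGo, List.getD, altGo_nil]

theorem altGo_flush1 (f : Nat) (c1 c2 : List (String × List Int)) (rest2 : List (List (String × List Int)))
    (h : ¬ pvEtapasLen c1 + pvEtapasLen c2 < 10) :
    pvAltGo (f + 1) (c1 :: c2 :: rest2) = [c1] :: pvAltGo f (c2 :: rest2) := by
  cases rest2 <;> simp [pvAltGo, List.getD, h]

theorem altGo_pair (f : Nat) (c1 c2 : List (String × List Int))
    (h : pvEtapasLen c1 + pvEtapasLen c2 < 10) :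
    pvAltGo (f + 1) [c1, c2] = [[c1, c2]] := by
  simp [pvAltGo, List.getD, h, altGo_nil]

theorem altGo_take2 (f : Nat) (c1 c2 c3 : List (String × List Int)) (rest3 : List (List (String × List Int)))
    (h12 : pvEtapasLen c1 + pvEtapasLen c2 < 10)
    (h123 : ¬ pvEtapasLen c1 + pvEtapasLen c2 + pvEtapasLen c3 ≤ 6) :
    pvAltGo (f + 1) (c1 :: c2 :: c3 :: rest3) = [c1, c2] :: pvAltGo f (c3 :: rest3) := by
  have h6 : ¬ pvEtapasLen c1 + (pvEtapasLen c2 + pvEtapasLen c3) ≤ 6 := by omega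
  simp [pvAltGo, List.getD, h12, h6]

theorem altGo_take3 (f : Nat) (c1 c2 c3 : List (String × List Int)) (rest3 : List (List (String × List Int)))
    (h12 : pvEtapasLen c1 + pvEtapasLen c2 < 10)
    (h123 : pvEtapasLen c1 + pvEtapasLen c2 + pvEtapasLen c3 ≤ 6) :
    pvAltGo (f + 1) (c1 :: c2 :: c3 :: rest3) = [c1, c2, c3] :: pvAltGo f rest3 := by
  have h6 : pvEtapasLen c1 + (pvEtapasLen c2 + pvEtapasLen c3) ≤ 6 := by omega
  simp [pvAltGo, List.getD, h12, h6]

theorem pv_foldA_eq_altGo (n : Nat) :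
    ∀ (dados : List (List (String × List Int))), dados.length ≤ n →
    ∀ (f : Nat), dados.length ≤ f →
    ∀ dp, pvFinA (dados.foldl pvStepA (dp, [])) = dp ++ pvAltGo f dados := by
  induction n with
  | zero =>
    intro dados h f hf dp
    have : dados = [] := by cases dados <;> simp_all
    subst this; simp [pvFinA, altGo_nil]
  | succ n ih =>
    intro dados hlen f hf dp
    match dados with
    | [] => simp [pvFinA, altGo_nil]
    | c1 :: rest =>
      obtain ⟨f', rfl⟩ : ∃ f', f = f' + 1 := by
        cases f
        · simp at hf
        · exact ⟨_, rfl⟩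
      have step1 : pvStepA (dp, []) c1 = (dp, [c1]) := pvStepA_neg _ _ (by simp)
      match rest with
      | [] =>
        simp only [List.foldl_cons, List.foldl_nil, step1]
        simp [pvFinA, altGo_single]
      | c2 :: rest2 =>
        by_cases h12 : pvEtapasLen c1 + pvEtapasLen c2 < 10
        · have step2 : pvStepA (dp, [c1]) c2 = (dp, [c1, c2]) :=
            pvStepA_neg _ _ (by simp; omega)
          match rest2 with
          | [] =>
            simp only [List.foldl_cons, List.foldl_nil, step1, step2]
            simp [pvFinA, altGo_pair f' c1 c2 h12]
          | c3 :: rest3 =>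
            by_cases h123 : pvEtapasLen c1 + pvEtapasLen c2 + pvEtapasLen c3 ≤ 6
            · have step3 : pvStepA (dp, [c1, c2]) c3 = (dp, [c1, c2, c3]) :=
                pvStepA_neg _ _ (by simp; omega)
              match rest3 with
              | [] =>
                simp only [List.foldl_cons, List.foldl_nil, step1, step2, step3]
                simp [pvFinA, altGo_take3 f' c1 c2 c3 [] h12 h123, altGo_nil]
              | c4 :: rest4 =>
                have step4 : pvStepA (dp, [c1, c2, c3]) c4 = (dp ++ [[c1, c2, c3]], [c4]) :=
                  pvStepA_pos _ _ (by simp)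
                have stepE : pvStepA (dp ++ [[c1, c2, c3]], []) c4 = (dp ++ [[c1, c2, c3]], [c4]) :=
                  pvStepA_neg _ _ (by simp)
                have hIH := ih (c4 :: rest4) (by simp at hlen ⊢; omega) f'
                  (by simp at hf ⊢; omega) (dp ++ [[c1, c2, c3]])
                rw [List.foldl_cons] at hIH
                rw [stepE] at hIH
                simp only [List.foldl_cons, step1, step2, step3, step4]
                rw [altGo_take3 f' c1 c2 c3 (c4 :: rest4) h12 h123, hIH]
                simp
            · have step3 : pvStepA (dp, [c1, c2]) c3 = (dp ++ [[c1, c2]], [c3]) :=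
                pvStepA_pos _ _ (by simp; omega)
              have stepE : pvStepA (dp ++ [[c1, c2]], []) c3 = (dp ++ [[c1, c2]], [c3]) :=
                pvStepA_neg _ _ (by simp)
              have hIH := ih (c3 :: rest3) (by simp at hlen ⊢; omega) f'
                (by simp at hf ⊢; omega) (dp ++ [[c1, c2]])
              rw [List.foldl_cons] at hIH
              rw [stepE] at hIH
              simp only [List.foldl_cons, step1, step2, step3]
              rw [altGo_take2 f' c1 c2 c3 rest3 h12 h123, hIH]
              simp
        · have step2 : pvStepA (dp, [c1]) c2 = (dp ++ [[c1]], [c2]) :=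
            pvStepA_pos _ _ (by simp; omega)
          have stepE : pvStepA (dp ++ [[c1]], []) c2 = (dp ++ [[c1]], [c2]) :=
            pvStepA_neg _ _ (by simp)
          have hIH := ih (c2 :: rest2) (by simp at hlen ⊢; omega) f'
            (by simp at hf ⊢; omega) (dp ++ [[c1]])
          rw [List.foldl_cons] at hIH
          rw [stepE] at hIH
          simp only [List.foldl_cons, step1, step2]
          rw [altGo_flush1 f' c1 c2 rest2 h12, hIH]
          simp

-- ===== VERDICT (by name: the statement is the Claim_ definition above) =====
theorem paginar_dados_relatorio_pdf_py_spec : Claim_equal_paginar_dados_relatorio_pdf_py := by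
  intro dados _ _
  show paginar_dados_relatorio_pdf_py dados = paginar_dados_relatorio_pdf_py_alt dados
  have h := pv_foldA_eq_altGo dados.length dados le_rfl dados.length le_rfl []
  rw [List.nil_append] at h
  exact h
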